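-- pv_equiv track=rewrite | github.com/kanggihoo/musinsa-crawling | crawler/preprocess.py | process_content_regions
-- ===== SOURCE A (Python) =====
-- def process_content_regions(content_regions, image_height, min_content_height, min_white_gap, padding=10):
--     """
--     컨텐츠 영역을 처리하는 함수
--     - 너무 작은 컨텐츠 영역은 노이즈로 제거
--     - 너무 가까운 컨텐츠 영역은 병합
--     - 적절한 여백 추가
--
--     Parameters:
--     - content_regions: 원본 컨텐츠 영역 리스트 [(시작행, 끝행), ...]
--     - image_height: 전체 이미지 높이
--     - min_content_height: 유효한 컨텐츠로 간주할 최소 높이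
--     - min_white_gap: 컨텐츠 영역을 분리하기 위한 최소 흰색 영역 높이
--     - padding: 각 분할 영역에 추가할 상하 여백
--
--     Returns:
--     - 최종 분할 영역 리스트 [(시작행, 끝행), ...]
--     """
--     if not content_regions:
--         return [(0, image_height-1)]
--
--     # 1. 너무 작은 컨텐츠 영역 제거 (노이즈 제거)
--     valid_regions = []
--     for start, end in content_regions:
--         if end - start + 1 >= min_content_height:
--             valid_regions.append((start, end))
--
--     if not valid_regions:
--         return [(0, image_height-1)]
--
--     # 2. 가까운 컨텐츠 영역 병합
--     merged_regions = []
--     current_start, current_end = valid_regions[0]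
--
--     for i in range(1, len(valid_regions)):
--         next_start, next_end = valid_regions[i]
--
--         # 두 컨텐츠 영역 사이의 흰색 영역 길이 계산
--         white_gap = next_start - current_end - 1
--
--         # 흰색 간격이 충분히 크지 않으면 병합
--         if white_gap < min_white_gap:
--             current_end = next_end  # 현재 영역 확장
--         else:
--             # 충분한 간격이 있으면 현재 영역 저장하고 다음 영역으로 이동
--             merged_regions.append((current_start, current_end))
--             current_start, current_end = next_start, next_end
--
--     # 마지막 영역 추가
--     merged_regions.append((current_start, current_end))
--
--     # 3. 분할 영역 계산 (여백 포함) - 직접 패딩 적용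
--     split_regions = []
--     for i, (start, end) in enumerate(merged_regions):
--         # 패딩 적용한 시작점과 끝점 계산
--         padded_start = max(0, start - padding)
--         padded_end = min(image_height - 1, end + padding)
--         split_regions.append((padded_start, padded_end))
--
--
--     return split_regions
-- ===== SOURCE B (Python) =====
-- def process_content_regions(content_regions, image_height, min_content_height, min_white_gap, padding=10):
--     """Break-point reconstruction: merged regions are read off by zipping the
--     list of group-start rows with the list of group-end rows, where group
--     boundaries are the adjacent pairs of valid regions whose white gap is
--     large enough. No accumulator merge loop."""
--     vs = [(s, e) for s, e in content_regions if e - s + 1 >= min_content_height]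
--     if not vs:
--         return [(0, image_height - 1)]
--     pairs = list(zip(vs, vs[1:]))
--     starts = [vs[0][0]] + [n[0] for p, n in pairs if n[0] - p[1] - 1 >= min_white_gap]
--     ends = [p[1] for p, n in pairs if n[0] - p[1] - 1 >= min_white_gap] + [vs[-1][1]]
--     return [(max(0, s - padding), min(image_height - 1, e + padding))
--             for s, e in zip(starts, ends)]
-- ===== Notes on version B (the rewrite author's own statement) =====
-- stated objective: alternative
-- what changed: Replaces the stateful accumulator merge loop by break-point reconstruction: it detects group boundaries as the adjacent pairs of valid regions with a large enough white gap (via zip(vs, vs[1:])) and rebuilds the merged regions by zipping the list of group-start rows with the list of group-end rows; no running current_start/current_end state exists.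
import Mathlib
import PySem

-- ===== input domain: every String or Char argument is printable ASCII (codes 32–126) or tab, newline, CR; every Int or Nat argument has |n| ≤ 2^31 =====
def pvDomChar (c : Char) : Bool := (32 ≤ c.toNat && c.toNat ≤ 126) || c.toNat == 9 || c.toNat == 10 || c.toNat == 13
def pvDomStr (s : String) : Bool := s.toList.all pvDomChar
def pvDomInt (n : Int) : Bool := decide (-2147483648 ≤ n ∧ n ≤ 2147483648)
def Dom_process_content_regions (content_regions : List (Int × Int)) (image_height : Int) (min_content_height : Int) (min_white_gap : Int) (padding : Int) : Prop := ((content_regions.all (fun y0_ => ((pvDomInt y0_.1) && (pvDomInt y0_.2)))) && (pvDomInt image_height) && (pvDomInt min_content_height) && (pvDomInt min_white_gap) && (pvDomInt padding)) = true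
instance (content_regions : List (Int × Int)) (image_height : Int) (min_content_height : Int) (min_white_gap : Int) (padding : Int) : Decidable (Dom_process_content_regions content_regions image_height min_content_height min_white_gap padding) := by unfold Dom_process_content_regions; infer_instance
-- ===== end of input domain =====

-- B rebuilds the merged regions by zipping break-start rows with break-end rows detected from adjacent pairs (no accumulator merge loop); same return value, alternative algorithm.

-- ===== PORT A =====
-- loop 1 of A: append regions tall enough
def pcrFilter (min_content_height : Int) : List (Int × Int) → List (Int × Int)
  | [] => []
  | (s, e) :: rest =>
      if e - s + 1 ≥ min_content_height then (s, e) :: pcrFilter min_content_height rest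
      else pcrFilter min_content_height rest

-- loop 2 of A: accumulator merge over valid_regions[1:]
def pcrMerge (min_white_gap : Int) (cs ce : Int) : List (Int × Int) → List (Int × Int)
  | [] => [(cs, ce)]
  | (ns, ne) :: rest =>
      if ns - ce - 1 < min_white_gap then pcrMerge min_white_gap cs ne rest
      else (cs, ce) :: pcrMerge min_white_gap ns ne rest

def process_content_regions (content_regions : List (Int × Int)) (image_height : Int) (min_content_height : Int) (min_white_gap : Int) (padding : Int) : List (Int × Int) :=
  if content_regions = [] then [(0, image_height - 1)]
  else
    match pcrFilter min_content_height content_regions with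
    | [] => [(0, image_height - 1)]
    | (s, e) :: rest =>
        -- loop 3 of A: padding pass
        (pcrMerge min_white_gap s e rest).map
          (fun p => (max 0 (p.1 - padding), min (image_height - 1) (p.2 + padding)))

-- ===== PORT B =====
-- Source B: comprehension filter, pairwise break detection, zip of starts with ends.
-- vs[-1] is ported as getLastD (exact here: vs is nonempty in that branch).
def process_content_regions_alt (content_regions : List (Int × Int)) (image_height : Int) (min_content_height : Int) (min_white_gap : Int) (padding : Int) : List (Int × Int) :=
  let vs := content_regions.filter (fun r => decide (r.2 - r.1 + 1 ≥ min_content_height))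
  match vs with
  | [] => [(0, image_height - 1)]
  | v0 :: _ =>
      let pairs := vs.zip (vs.drop 1)
      let keep := pairs.filter (fun pn => decide (pn.2.1 - pn.1.2 - 1 ≥ min_white_gap))
      let starts := v0.1 :: keep.map (fun pn => pn.2.1)
      let ends := keep.map (fun pn => pn.1.2) ++ [(vs.getLastD (0, 0)).2]
      (starts.zip ends).map
        (fun se => (max 0 (se.1 - padding), min (image_height - 1) (se.2 + padding)))

-- ===== PRECONDITION & SPEC =====
def Spec_process_content_regions (content_regions : List (Int × Int)) (image_height : Int) (min_content_height : Int) (min_white_gap : Int) (padding : Int) (out : List (Int × Int)) : Prop := out = process_content_regions_alt content_regions image_height min_content_height min_white_gap padding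
instance (content_regions : List (Int × Int)) (image_height : Int) (min_content_height : Int) (min_white_gap : Int) (padding : Int) (out : List (Int × Int)) : Decidable (Spec_process_content_regions content_regions image_height min_content_height min_white_gap padding out) := by unfold Spec_process_content_regions; infer_instance

-- ===== CLAIM (what is proved, stated in full; the proofs are below) =====
def Claim_equal_process_content_regions : Prop := ∀ (content_regions : List (Int × Int)) (image_height : Int) (min_content_height : Int) (min_white_gap : Int) (padding : Int), Dom_process_content_regions content_regions image_height min_content_height min_white_gap padding → Spec_process_content_regions content_regions image_height min_content_height min_white_gap padding (process_content_regions content_regions image_height min_content_height min_white_gap padding)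

-- ===== LEMMAS AND PROOFS =====
-- proof-side restatement of B's unpadded start/end reconstruction
def pvKeep (gap : Int) (vs : List (Int × Int)) : List ((Int × Int) × (Int × Int)) :=
  (vs.zip (vs.drop 1)).filter (fun pn => decide (pn.2.1 - pn.1.2 - 1 ≥ gap))

def pvSE (gap : Int) : List (Int × Int) → List (Int × Int)
  | [] => []
  | v0 :: t =>
      ((v0.1 :: (pvKeep gap (v0 :: t)).map (fun pn => pn.2.1)).zip
        ((pvKeep gap (v0 :: t)).map (fun pn => pn.1.2) ++ [((v0 :: t).getLastD (0, 0)).2]))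

-- the first region's start row is irrelevant to the break-start and break-end lists
lemma pvKeep_starts_irrel (gap a b e : Int) (t : List (Int × Int)) :
    (pvKeep gap ((a, e) :: t)).map (fun pn => pn.2.1) = (pvKeep gap ((b, e) :: t)).map (fun pn => pn.2.1) := by
  cases t with
  | nil => simp [pvKeep]
  | cons u t' =>
      simp only [pvKeep, List.drop, List.zip_cons_cons, List.filter]
      by_cases hd : u.1 - e - 1 ≥ gap <;> simp [hd]

lemma pvKeep_ends_irrel (gap a b e : Int) (t : List (Int × Int)) :
    (pvKeep gap ((a, e) :: t)).map (fun pn => pn.1.2) = (pvKeep gap ((b, e) :: t)).map (fun pn => pn.1.2) := by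
  cases t with
  | nil => simp [pvKeep]
  | cons u t' =>
      simp only [pvKeep, List.drop, List.zip_cons_cons, List.filter]
      by_cases hd : u.1 - e - 1 ≥ gap <;> simp [hd]

lemma pcrMerge_eq_pvSE (gap : Int) :
    ∀ (rest : List (Int × Int)) (cs ce : Int),
      pcrMerge gap cs ce rest = pvSE gap ((cs, ce) :: rest)
  | [], cs, ce => by simp [pcrMerge, pvSE, pvKeep]
  | (ns, ne) :: t, cs, ce => by
      by_cases hg : ns - ce - 1 < gap
      · -- merged: A continues with (cs, ne); B drops this adjacent pair from the break lists
        have h1 : ¬ (ns - ce - 1 ≥ gap) := by omega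
        rw [pcrMerge, if_pos hg, pcrMerge_eq_pvSE gap t cs ne]
        have e1 : pvKeep gap ((cs, ce) :: (ns, ne) :: t) = pvKeep gap ((ns, ne) :: t) := by
          simp only [pvKeep, List.drop, List.zip_cons_cons, List.filter]
          rw [decide_eq_false h1]
        have last1 : ((cs, ne) :: t).getLastD (0, 0) = t.getLastD (cs, ne) := List.getLastD_cons ..
        have last2 : ((cs, ce) :: (ns, ne) :: t).getLastD (0, 0) = t.getLastD (ns, ne) := by
          rw [List.getLastD_cons, List.getLastD_cons]
        have lastEq : (t.getLastD (cs, ne)).2 = (t.getLastD (ns, ne)).2 := by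
          cases t with
          | nil => rfl
          | cons x t' => rw [List.getLastD_cons, List.getLastD_cons]
        simp only [pvSE, e1, last1, last2, lastEq,
          pvKeep_starts_irrel gap cs ns ne t, pvKeep_ends_irrel gap cs ns ne t]
      · -- break: A emits (cs, ce); B's break lists gain ns / ce at the front
        have h1 : ns - ce - 1 ≥ gap := by omega
        rw [pcrMerge, if_neg hg, pcrMerge_eq_pvSE gap t ns ne]
        simp only [pvSE, pvKeep, List.drop, List.zip_cons_cons, List.filter]
        rw [decide_eq_true h1]
        simp [List.zip_cons_cons]

lemma pcrFilter_eq_filter (mch : Int) :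
    ∀ (l : List (Int × Int)), pcrFilter mch l = l.filter (fun r => decide (r.2 - r.1 + 1 ≥ mch))
  | [] => rfl
  | (s, e) :: rest => by
      rw [pcrFilter, pcrFilter_eq_filter mch rest]
      by_cases h : e - s + 1 ≥ mch <;> simp [List.filter, h]

-- ===== VERDICT (by name: the statement is the Claim_ definition above) =====
theorem process_content_regions_spec : Claim_equal_process_content_regions := by
  intro cr h mch gap pad _
  unfold Spec_process_content_regions process_content_regions process_content_regions_alt
  rw [pcrFilter_eq_filter]
  by_cases hcr : cr = []
  · subst hcr; simp
  · rw [if_neg hcr]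
    cases hv : cr.filter (fun r => decide (r.2 - r.1 + 1 ≥ mch)) with
    | nil => simp
    | cons v0 t =>
        obtain ⟨s, e⟩ := v0
        dsimp only
        rw [pcrMerge_eq_pvSE]
        simp [pvSE, pvKeep]
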